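-- pv_equiv track=rewrite | github.com/mkXultra/mew | src/mew/long_build_substrate.py | _stage_status
-- ===== SOURCE A (Python) =====
-- from typing import Iterable, Mapping
--
-- def _stage_status(attempts: Iterable[Mapping[str, object]], stage: str) -> str:
--     stage_attempts = [item for item in attempts if item.get("stage") == stage]
--     if any(item.get("result") == "success" for item in stage_attempts):
--         return "satisfied"
--     if any(item.get("result") in {"failure", "timeout"} for item in stage_attempts):
--         return "blocked"
--     if stage_attempts:
--         return "unknown"
--     return "unknown"
-- ===== SOURCE B (Python) =====
-- def _stage_status(attempts, stage):
--     has_block = False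
--     for item in attempts:
--         if item.get("stage") != stage:
--             continue
--         if item.get("result") == "success":
--             return "satisfied"
--         if item.get("result") in ("failure", "timeout"):
--             has_block = True
--     return "blocked" if has_block else "unknown"
-- ===== Notes on version B (the rewrite author's own statement) =====
-- stated objective: simpler
-- what changed: Replaces the intermediate filtered list plus two any-scans with a single streaming pass that returns 'satisfied' on the first success and otherwise maintains a has_block flag.
import Mathlib
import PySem

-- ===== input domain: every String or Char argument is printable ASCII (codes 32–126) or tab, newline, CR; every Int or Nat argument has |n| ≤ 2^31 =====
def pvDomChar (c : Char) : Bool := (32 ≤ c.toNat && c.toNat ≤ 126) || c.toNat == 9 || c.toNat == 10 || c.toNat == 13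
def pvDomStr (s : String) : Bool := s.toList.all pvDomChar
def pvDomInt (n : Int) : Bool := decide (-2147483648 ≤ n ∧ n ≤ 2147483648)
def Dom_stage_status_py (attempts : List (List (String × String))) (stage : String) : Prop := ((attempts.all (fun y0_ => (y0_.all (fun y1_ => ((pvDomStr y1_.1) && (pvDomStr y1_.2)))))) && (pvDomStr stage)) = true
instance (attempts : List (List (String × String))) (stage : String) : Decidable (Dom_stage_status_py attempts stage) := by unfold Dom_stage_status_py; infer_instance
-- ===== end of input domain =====

-- B replaces A's filtered list plus two any-scans with one streaming pass keeping a has_block flag ('simpler').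

-- ===== PORT A =====
def stage_status_py (attempts : List (List (String × String))) (stage : String) : String :=
  let stage_attempts := attempts.filter (fun item => PySem.Dict.get? (PySem.Dict.mk item) "stage" == some stage)
  if stage_attempts.any (fun item => PySem.Dict.get? (PySem.Dict.mk item) "result" == some "success") then
    "satisfied"
  else if stage_attempts.any (fun item =>
      PySem.Dict.get? (PySem.Dict.mk item) "result" == some "failure" ||
      PySem.Dict.get? (PySem.Dict.mk item) "result" == some "timeout") then
    "blocked"
  else if stage_attempts ≠ [] then
    "unknown"
  else
    "unknown"

-- ===== PORT B =====
def stage_status_py_alt_go (stage : String) : List (List (String × String)) → Bool → String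
  | [], has_block => if has_block then "blocked" else "unknown"
  | item :: rest, has_block =>
    if PySem.Dict.get? (PySem.Dict.mk item) "stage" != some stage then
      stage_status_py_alt_go stage rest has_block
    else if PySem.Dict.get? (PySem.Dict.mk item) "result" == some "success" then
      "satisfied"
    else if PySem.Dict.get? (PySem.Dict.mk item) "result" == some "failure" ||
            PySem.Dict.get? (PySem.Dict.mk item) "result" == some "timeout" then
      stage_status_py_alt_go stage rest true
    else
      stage_status_py_alt_go stage rest has_block

def stage_status_py_alt (attempts : List (List (String × String))) (stage : String) : String :=
  stage_status_py_alt_go stage attempts false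

-- ===== PRECONDITION & SPEC =====
def Spec_stage_status_py (attempts : List (List (String × String))) (stage : String) (out : String) : Prop := out = stage_status_py_alt attempts stage
instance (attempts : List (List (String × String))) (stage : String) (out : String) : Decidable (Spec_stage_status_py attempts stage out) := by unfold Spec_stage_status_py; infer_instance

-- ===== CLAIM (what is proved, stated in full; the proofs are below) =====
def Claim_equal_stage_status_py : Prop := ∀ (attempts : List (List (String × String))) (stage : String), Dom_stage_status_py attempts stage → Spec_stage_status_py attempts stage (stage_status_py attempts stage)

-- ===== LEMMAS AND PROOFS =====

-- Loop invariant: the streaming pass equals A's three-scan form with the flag folded in.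
theorem go_characterizes (stage : String) (attempts : List (List (String × String))) (hb : Bool) :
    stage_status_py_alt_go stage attempts hb =
      (let sa := attempts.filter (fun item => PySem.Dict.get? (PySem.Dict.mk item) "stage" == some stage)
       if sa.any (fun item => PySem.Dict.get? (PySem.Dict.mk item) "result" == some "success") then "satisfied"
       else if hb || sa.any (fun item =>
          PySem.Dict.get? (PySem.Dict.mk item) "result" == some "failure" ||
          PySem.Dict.get? (PySem.Dict.mk item) "result" == some "timeout") then "blocked"
       else "unknown") := by
  induction attempts generalizing hb with
  | nil => cases hb <;> simp [stage_status_py_alt_go]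
  | cons item rest ih =>
    by_cases hst : (PySem.Dict.mk item).get? "stage" = some stage
    · by_cases hs : (PySem.Dict.mk item).get? "result" = some "success"
      · simp [stage_status_py_alt_go, hst, hs]
      · by_cases hf : (PySem.Dict.mk item).get? "result" = some "failure" ∨
            (PySem.Dict.mk item).get? "result" = some "timeout"
        · simp [stage_status_py_alt_go, hst, hs, hf, ih]
        · have hf' := not_or.mp hf
          simp [stage_status_py_alt_go, hst, hs, hf'.1, hf'.2, ih]
    · simp [stage_status_py_alt_go, hst, ih]

-- ===== VERDICT (by name: the statement is the Claim_ definition above) =====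
theorem stage_status_py_spec : Claim_equal_stage_status_py := by
  intro attempts stage _
  unfold Spec_stage_status_py stage_status_py stage_status_py_alt
  rw [go_characterizes]
  simp only [Bool.false_or]
  split_ifs <;> simp_all
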